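-- pv_equiv track=rewrite | github.com/Jaybear411/Mosaic | OpenAIScript.py | analyze_descriptions
-- ===== SOURCE A (Python) =====
-- from collections import Counter
-- from typing import List
--
-- def analyze_descriptions(descriptions: List[str]) -> List[str]:
--     words = []
--     for description in descriptions:
--         words.extend(description.lower().replace('.', '').replace(',', '').split())
--     word_counts = Counter(words)
--     common_stopwords = {'the', 'and', 'a', 'to', 'of', 'in', 'on', 'with', 'as', 'for', 'is', 'at', 'it', 'this', 'that', 'these', 'those'}
--     common_words = [word for word, count in word_counts.items() if count > 1 and word not in common_stopwords]
--     return common_words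
-- ===== SOURCE B (Python) =====
-- def analyze_descriptions(descriptions):
--     common_stopwords = {'the', 'and', 'a', 'to', 'of', 'in', 'on', 'with', 'as', 'for', 'is', 'at', 'it', 'this', 'that', 'these', 'those'}
--     tokens = [w for d in descriptions for w in d.lower().replace('.', '').replace(',', '').split()]
--     # peel the token list: emit the head if it recurs later and is not a stopword,
--     # then continue on the tail with every copy of the head removed
--     result = []
--     while tokens:
--         head, rest = tokens[0], tokens[1:]
--         if head in rest and head not in common_stopwords:
--             result.append(head)
--         tokens = [t for t in rest if t != head]
--     return result
-- ===== Notes on version B (the rewrite author's own statement) =====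
-- stated objective: alternative
-- what changed: Replaces Counter's count-then-filter over dict items with a peeling while loop: emit the head token if it recurs in the rest and is not a stopword, then continue on the rest with all copies of the head filtered out, so no counts, dicts or auxiliary sets are kept.
import Mathlib
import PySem

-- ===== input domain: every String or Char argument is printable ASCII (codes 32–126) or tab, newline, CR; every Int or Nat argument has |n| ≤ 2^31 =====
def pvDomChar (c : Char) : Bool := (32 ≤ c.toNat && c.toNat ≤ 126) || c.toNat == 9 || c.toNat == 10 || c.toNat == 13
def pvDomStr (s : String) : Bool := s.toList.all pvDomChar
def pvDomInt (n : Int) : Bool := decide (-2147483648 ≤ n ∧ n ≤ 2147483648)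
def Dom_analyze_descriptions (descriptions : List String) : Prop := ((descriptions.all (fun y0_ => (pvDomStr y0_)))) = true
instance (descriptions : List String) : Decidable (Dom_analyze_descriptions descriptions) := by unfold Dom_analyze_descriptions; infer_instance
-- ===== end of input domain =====

-- B replaces Counter's count-then-filter with a recursion on the token list (emit the head when it
-- recurs later and is not a stopword, then recurse on the tail with the head's copies removed);
-- an alternative of different structure, not faster.

def pvStopwords : PySem.Set String :=
  PySem.Set.ofList ["the", "and", "a", "to", "of", "in", "on", "with", "as", "for", "is", "at", "it", "this", "that", "these", "those"]

-- tokenization of ONE description (the identical expression in both Pythons):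
-- description.lower().replace('.', '').replace(',', '').split()
def pvTok (d : String) : List String :=
  PySem.Str.split₀ (PySem.Str.replace (PySem.Str.replace (PySem.Str.lower d) "." "") "," "")

-- ===== PORT A =====
-- words = []; for description in descriptions: words.extend(...); Counter; filter items
def analyze_descriptions (descriptions : List String) : List String :=
  let words := descriptions.foldl (fun ws d => ws ++ pvTok d) []
  let word_counts := PySem.Dict.counter words
  (word_counts.items.filter (fun p => decide (1 < p.2) && !(PySem.Set.contains pvStopwords p.1))).map (·.1)

-- ===== PORT B =====
-- result = []; while tokens: head, rest = tokens[0], tokens[1:];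
--   if head in rest and head not in common_stopwords: result.append(head);
--   tokens = [t for t in rest if t != head]
def pvScan (result : List String) : List String → List String
  | [] => result
  | head :: rest =>
    pvScan (if decide (head ∈ rest) && !(PySem.Set.contains pvStopwords head)
            then result ++ [head] else result)
      (rest.filter (fun t => t ≠ head))
termination_by ts => ts.length
decreasing_by
  simp only [List.length_unattach]
  exact Nat.lt_succ_of_le (by simpa using List.length_filter_le _ rest.attach)

-- tokens = [w for d in descriptions for w in ...]; then the while loop above
def analyze_descriptions_alt (descriptions : List String) : List String :=
  pvScan [] (descriptions.flatMap pvTok)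

-- ===== PRECONDITION & SPEC =====
def Spec_analyze_descriptions (descriptions : List String) (out : List String) : Prop := out = analyze_descriptions_alt descriptions
instance (descriptions : List String) (out : List String) : Decidable (Spec_analyze_descriptions descriptions out) := by unfold Spec_analyze_descriptions; infer_instance

-- ===== CLAIM (what is proved, stated in full; the proofs are below) =====
def Claim_equal_analyze_descriptions : Prop := ∀ (descriptions : List String), Dom_analyze_descriptions descriptions → Spec_analyze_descriptions descriptions (analyze_descriptions descriptions)

-- ===== LEMMAS AND PROOFS =====

-- discard on a set is an element-wise filter
theorem pv_discard_eq_filter (s : PySem.Set String) (x : String) :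
    PySem.Set.discard s x = s.filter (fun t => t ≠ x) := by
  unfold PySem.Set.discard
  apply List.filter_congr
  intro a _
  simp only [ne_eq, decide_not, Bool.beq_eq_decide_eq]

-- set(xs) commutes with an element-wise filter
theorem pv_ofList_filter (p : String → Bool) (l : List String) :
    PySem.Set.ofList (l.filter p) = (PySem.Set.ofList l).filter p := by
  induction l with
  | nil => rfl
  | cons x xs ih =>
    rw [List.filter_cons, PySem.Set.ofList_cons, pv_discard_eq_filter, List.filter_cons]
    by_cases hp : p x
    · rw [if_pos hp, hp, if_pos rfl, PySem.Set.ofList_cons, pv_discard_eq_filter, ih,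
        List.filter_filter, List.filter_filter]
      congr 1
      apply List.filter_congr
      intro a _
      rw [Bool.and_comm]
    · have hp' : p x = false := by simpa using hp
      rw [if_neg (by simp [hp']), hp']
      simp only [Bool.false_eq_true, if_false]
      rw [ih, List.filter_filter]
      apply List.filter_congr
      intro a _
      by_cases ha : a = x
      · subst ha; simp [hp']
      · simp [ha]

-- B's recursion emits the first occurrences of the repeated non-stopword tokens, in order
theorem pvScan_eq_aux : ∀ (n : Nat) (l : List String), l.length ≤ n → ∀ (acc : List String),
    pvScan acc l = acc ++ (PySem.Set.ofList l).filter
      (fun w => decide (1 < (l.count w : Int)) && !(PySem.Set.contains pvStopwords w)) := by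
  intro n
  induction n with
  | zero =>
    intro l hl acc
    rw [List.length_eq_zero_iff.mp (Nat.le_zero.mp hl), pvScan]
    simp
  | succ n ih =>
    intro l hl acc
    match l with
    | [] => rw [pvScan]; simp
    | head :: rest =>
      rw [pvScan, PySem.Set.ofList_cons, pv_discard_eq_filter, List.filter_cons]
      have hrest : (rest.filter (fun t => t ≠ head)).length ≤ n :=
        le_trans (List.length_filter_le _ _) (by simpa using hl)
      rw [ih _ hrest, List.filter_filter]
      have hhead : decide (1 < ((List.count head (head :: rest) : Nat) : Int)) = decide (head ∈ rest) := by
        rw [List.count_cons_self]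
        by_cases h : head ∈ rest
        · have := List.count_pos_iff.mpr h
          simp only [h, decide_true]
          rw [decide_eq_true_iff]
          push_cast; omega
        · have : rest.count head = 0 := List.count_eq_zero.mpr h
          simp [this, h]
      have htail : List.filter (fun a => (decide (1 < ((List.count a (head :: rest) : Nat) : Int)) &&
            !(PySem.Set.contains pvStopwords a)) && decide (a ≠ head)) (PySem.Set.ofList rest)
          = List.filter (fun w => decide (1 < ((List.count w (rest.filter (fun t => t ≠ head)) : Nat) : Int)) &&
            !(PySem.Set.contains pvStopwords w)) (PySem.Set.ofList (rest.filter (fun t => t ≠ head))) := by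
        rw [pv_ofList_filter, List.filter_filter]
        apply List.filter_congr
        intro a _
        by_cases ha : a = head
        · subst ha; simp
        · have hc : (rest.filter (fun t => t ≠ head)).count a = rest.count a :=
            List.count_filter (by simp [ha])
          rw [hc]
          simp [ha, Ne.symm ha, Bool.and_comm]
      by_cases hcond : (decide (head ∈ rest) && !(PySem.Set.contains pvStopwords head)) = true
      · rw [if_pos hcond, if_pos (by rw [hhead]; exact hcond), htail, List.append_assoc]
        rfl
      · rw [if_neg hcond, if_neg (by rw [hhead]; exact hcond), htail]

theorem pvScan_eq (l : List String) :
    pvScan [] l = (PySem.Set.ofList l).filter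
      (fun w => decide (1 < (l.count w : Int)) && !(PySem.Set.contains pvStopwords w)) := by
  rw [pvScan_eq_aux l.length l le_rfl []]
  rfl

-- ===== VERDICT (by name: the statement is the Claim_ definition above) =====
theorem analyze_descriptions_spec : Claim_equal_analyze_descriptions := by
  intro descs _
  unfold Spec_analyze_descriptions analyze_descriptions analyze_descriptions_alt
  rw [← List.flatMap_eq_foldl, pvScan_eq]
  simp only [PySem.Dict.items_counter, List.filter_map, List.map_map, Function.comp_def]
  simp
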